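-- pv_equiv track=rewrite | github.com/ilivans/law-themes-classifier | web_page/utility.py | count_entries2
-- ===== SOURCE A (Python) =====
-- PAIR_WEIGHT = 2
--
-- def count_entries2(words, text):
--     count = 0
--     words = words.split(' ')
--     for i in range(len(words)-1):
--         if words[i] in text:
--             count += 1
--             pair = ' '.join((words[i], words[i+1]))
--             if pair in text:
--                 count += PAIR_WEIGHT
--     if words[-1] in text:
--         count += 1
--     return count
-- ===== SOURCE B (Python) =====
-- PAIR_WEIGHT = 2
--
-- def count_entries2(words, text):
--     ws = words.split(' ')
--     word_hits = sum(w in text for w in ws)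
--     pair_hits = sum(' '.join(p) in text for p in zip(ws, ws[1:]))
--     return word_hits + PAIR_WEIGHT * pair_hits
-- ===== Notes on version B (the rewrite author's own statement) =====
-- stated objective: simpler
-- what changed: A's single index loop with the pair check nested under the word check is replaced by two independent flat sums (word hits, plus PAIR_WEIGHT times adjacent-pair hits over zip(ws, ws[1:])), relying on the fact that a pair hit implies a hit of its first word.
import Mathlib
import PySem

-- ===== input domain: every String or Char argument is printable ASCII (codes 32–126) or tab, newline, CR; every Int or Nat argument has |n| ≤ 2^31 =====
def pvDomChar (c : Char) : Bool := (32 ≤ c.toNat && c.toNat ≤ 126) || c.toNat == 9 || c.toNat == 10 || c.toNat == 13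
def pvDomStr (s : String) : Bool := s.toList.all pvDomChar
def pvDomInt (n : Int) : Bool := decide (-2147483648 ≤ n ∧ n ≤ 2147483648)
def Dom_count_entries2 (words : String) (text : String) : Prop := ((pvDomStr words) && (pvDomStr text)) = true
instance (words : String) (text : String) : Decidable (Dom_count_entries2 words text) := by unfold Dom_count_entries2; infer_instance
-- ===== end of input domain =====

-- B replaces A's single interleaved index loop (pair check nested under the word check) by two
-- independent sums — word hits plus PAIR_WEIGHT times adjacent-pair hits (objective: simpler).

def PAIR_WEIGHT : Int := 2

-- ===== PORT A =====
def count_entries2 (words : String) (text : String) : Int :=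
  let ws : List String := (PySem.Str.split? words " ").getD []
  let count : Int :=
    (PySem.List.pyRange 0 ((PySem.List.len ws) - 1)).foldl
      (fun count i =>
        if PySem.Str.isIn (PySem.List.pyGetD ws i "") text then
          let count := count + 1
          let pair := PySem.Str.join " " [PySem.List.pyGetD ws i "", PySem.List.pyGetD ws (i+1) ""]
          if PySem.Str.isIn pair text then count + PAIR_WEIGHT else count
        else count) 0
  if PySem.Str.isIn (PySem.List.pyGetD ws (-1) "") text then count + 1 else count

-- ===== PORT B =====
def count_entries2_alt (words : String) (text : String) : Int :=
  let ws : List String := (PySem.Str.split? words " ").getD []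
  let wordHits : Int := (ws.map (fun w => if PySem.Str.isIn w text then (1:Int) else 0)).sum
  let pairHits : Int :=
    ((ws.zip (PySem.List.slice ws (some 1) none)).map
      (fun p => if PySem.Str.isIn (PySem.Str.join " " [p.1, p.2]) text then (1:Int) else 0)).sum
  wordHits + PAIR_WEIGHT * pairHits


-- ===== PRECONDITION & SPEC =====
def Spec_count_entries2 (words : String) (text : String) (out : Int) : Prop := out = count_entries2_alt words text
instance (words : String) (text : String) (out : Int) : Decidable (Spec_count_entries2 words text out) := by unfold Spec_count_entries2; infer_instance

-- ===== CLAIM (what is proved, stated in full; the proofs are below) =====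
def Claim_equal_count_entries2 : Prop := ∀ (words : String) (text : String), Dom_count_entries2 words text → Spec_count_entries2 words text (count_entries2 words text)

-- ===== LEMMAS AND PROOFS =====

theorem splitOn_go_ne_nil (sep : List Char) (fuel : Nat) (l cur : List Char)
    (acc : List (List Char)) : PySem.Chars.splitOn.go sep fuel l cur acc ≠ [] := by
  induction fuel generalizing l cur acc with
  | zero => simp [PySem.Chars.splitOn.go]
  | succ n ih =>
    cases l with
    | nil => simp [PySem.Chars.splitOn.go]
    | cons c rest =>
      rw [PySem.Chars.splitOn.go]
      split
      · exact ih _ _ _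
      · exact ih _ _ _

theorem split_space_ne_nil (words : String) :
    (PySem.Str.split? words " ").getD [] ≠ [] := by
  have h := PySem.Str.split?_map words " "
  cases hs : PySem.Str.split? words " " with
  | none => rw [hs] at h; simp [PySem.Chars.split?] at h
  | some l =>
    rw [hs] at h
    simp only [PySem.Chars.split?] at h
    simp only [Option.map_some] at h
    intro hnil
    simp only [Option.getD_some] at hnil
    rw [hnil] at h
    simp at h
    rw [PySem.Chars.splitOn] at h
    exact splitOn_go_ne_nil _ _ _ _ _ h

theorem isIn_of_pair (a b text : String)
    (h : PySem.Str.isIn (PySem.Str.join " " [a, b]) text = true) :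
    PySem.Str.isIn a text = true := by
  rw [PySem.Str.isIn_iff_infix] at h ⊢
  rw [PySem.Str.toList_join] at h
  simp only [List.map_cons, List.map_nil] at h
  rw [show (" " : String).toList = [' '] from rfl] at h
  rw [PySem.Chars.join_cons_cons, PySem.Chars.join_singleton] at h
  exact ((List.prefix_append a.toList ([' '] ++ b.toList)).isInfix).trans (by simpa using h)

theorem comb (text : String) (a : String) (ws : List String) (c : Int) :
    ((a :: ws).zip ws).foldl
      (fun count p =>
        if PySem.Str.isIn p.1 text then
          let count := count + 1
          if PySem.Str.isIn (PySem.Str.join " " [p.1, p.2]) text then count + PAIR_WEIGHT else count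
        else count) c
    + (if PySem.Str.isIn (List.getLast (a :: ws) (by simp)) text then (1:Int) else 0)
    = c + ((a :: ws).map (fun w => if PySem.Str.isIn w text then (1:Int) else 0)).sum
      + 2 * (((a :: ws).zip ws).map
          (fun p => if PySem.Str.isIn (PySem.Str.join " " [p.1, p.2]) text then (1:Int) else 0)).sum := by
  induction ws generalizing a c with
  | nil =>
    simp only [List.zip_nil_right, List.foldl_nil, List.map_nil, List.sum_nil, List.map_cons,
      List.sum_cons, List.getLast_singleton]
    ring_nf
  | cons b ws ih =>
    have hg : ∀ (c : Int),
        (if PySem.Str.isIn a text then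
          (if PySem.Str.isIn (PySem.Str.join " " [a, b]) text then c + 1 + PAIR_WEIGHT else c + 1)
        else c)
        = c + (if PySem.Str.isIn a text then (1:Int) else 0)
            + 2 * (if PySem.Str.isIn (PySem.Str.join " " [a, b]) text then (1:Int) else 0) := by
      intro c
      by_cases hp : PySem.Str.isIn (PySem.Str.join " " [a, b]) text = true
      · rw [if_pos (isIn_of_pair a b text hp), if_pos hp, if_pos (isIn_of_pair a b text hp), if_pos hp]
        unfold PAIR_WEIGHT; ring
      · rw [if_neg hp, if_neg hp]
        by_cases ha : PySem.Str.isIn a text = true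
        · rw [if_pos ha, if_pos ha]; ring
        · rw [if_neg ha, if_neg ha]; ring
    have hz : (a :: b :: ws).zip (b :: ws) = (a, b) :: ((b :: ws).zip ws) := rfl
    rw [hz]
    simp only [List.foldl_cons]
    rw [hg]
    rw [List.getLast_cons (by simp)]
    rw [ih b]
    simp only [List.map_cons, List.sum_cons]
    ring

theorem main_eq (words text : String) : count_entries2 words text = count_entries2_alt words text := by
  simp only [count_entries2, count_entries2_alt]
  obtain ⟨a, rest, hws⟩ : ∃ a rest, (PySem.Str.split? words " ").getD [] = a :: rest := by
    cases h : (PySem.Str.split? words " ").getD [] with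
    | nil => exact absurd h (split_space_ne_nil words)
    | cons a rest => exact ⟨a, rest, rfl⟩
  rw [hws]
  set ws : List String := a :: rest with hdef
  have hlen : PySem.List.len ws - 1 = PySem.List.len (ws.zip rest) := by
    simp [PySem.List.len, hdef, List.length_zip]
  rw [hlen]
  have hcongr :
      (PySem.List.pyRange 0 (PySem.List.len (ws.zip rest))).foldl
        (fun count i =>
          if PySem.Str.isIn (PySem.List.pyGetD ws i "") text then
            let count := count + 1
            let pair := PySem.Str.join " " [PySem.List.pyGetD ws i "", PySem.List.pyGetD ws (i+1) ""]
            if PySem.Str.isIn pair text then count + PAIR_WEIGHT else count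
          else count) 0
      = (PySem.List.pyRange 0 (PySem.List.len (ws.zip rest))).foldl
        (fun count i =>
          (fun (count : Int) (p : String × String) =>
            if PySem.Str.isIn p.1 text then
              let count := count + 1
              if PySem.Str.isIn (PySem.Str.join " " [p.1, p.2]) text then count + PAIR_WEIGHT else count
            else count) count (PySem.List.pyGetD (ws.zip rest) i ("", ""))) 0 := by
    apply PySem.List.foldl_congr_mem
    intro acc i hi
    rw [PySem.List.mem_pyRange_one] at hi
    obtain ⟨h0, hlt⟩ := hi
    have hn : i = ((i.toNat : Nat) : Int) := (Int.toNat_of_nonneg h0).symm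
    have hnlt : i.toNat < (ws.zip rest).length := by
      simp only [PySem.List.len] at hlt; omega
    have hzl : (ws.zip rest).length = rest.length := by simp [hdef, List.length_zip]
    have hw1 : i.toNat < ws.length := by simp only [hdef, List.length_cons]; omega
    have hw2 : i.toNat + 1 < ws.length := by simp only [hdef, List.length_cons]; omega
    have hA : PySem.List.pyGetD ws i "" = ws.getD i.toNat "" := by
      conv_lhs => rw [hn, PySem.List.pyGetD_natCast]
    have hB : PySem.List.pyGetD ws (i+1) "" = ws.getD (i.toNat + 1) "" := by
      conv_lhs => rw [show i + 1 = ((i.toNat + 1 : Nat) : Int) by omega, PySem.List.pyGetD_natCast]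
    have hC : PySem.List.pyGetD (ws.zip rest) i ("", "") = (ws.zip rest).getD i.toNat ("", "") := by
      conv_lhs => rw [hn, PySem.List.pyGetD_natCast]
    have hD : (ws.zip rest).getD i.toNat ("", "") = (ws.getD i.toNat "", ws.getD (i.toNat + 1) "") := by
      rw [List.getD_eq_getElem _ _ hnlt, List.getD_eq_getElem _ _ hw1, List.getD_eq_getElem _ _ hw2]
      rw [List.getElem_zip]
      refine Prod.ext rfl ?_
      simp [hdef]
    rw [hA, hB, hC, hD]
  rw [hcongr]
  rw [PySem.List.foldl_pyRange_zero_pyGetD (ws.zip rest) ("", "")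
    (fun count p =>
      if PySem.Str.isIn p.1 text then
        let count := count + 1
        if PySem.Str.isIn (PySem.Str.join " " [p.1, p.2]) text then count + PAIR_WEIGHT else count
      else count) 0]
  have hlast : PySem.List.pyGetD ws (-1) "" = List.getLast ws (by simp [hdef]) := by
    rw [PySem.List.pyGetD_neg_ofNat ws 1 "" (by omega) (by simp [hdef])]
    rw [List.getLast_eq_getElem]
  have hslice : PySem.List.slice ws (some 1) none = rest := by
    rw [PySem.List.slice_from ws (by omega : (0:Int) ≤ 1)]
    simp [hdef]
  rw [hslice, hlast]
  have hcomb := comb text a rest 0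
  rw [hdef] at *
  by_cases hl : PySem.Str.isIn (List.getLast (a :: rest) (by simp)) text = true
  · rw [if_pos hl]
    rw [if_pos hl] at hcomb
    unfold PAIR_WEIGHT at hcomb ⊢
    linarith [hcomb]
  · rw [if_neg hl]
    rw [if_neg hl] at hcomb
    unfold PAIR_WEIGHT at hcomb ⊢
    linarith [hcomb]

-- ===== VERDICT (by name: the statement is the Claim_ definition above) =====
theorem count_entries2_spec : Claim_equal_count_entries2 := by
  intro words text _
  unfold Spec_count_entries2
  exact main_eq words text
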